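-- pv_equiv track=rewrite | github.com/Project134/shurit | nbrkr_scr.py | building_age_sort_key
-- ===== SOURCE A (Python) =====
-- BUILDING_AGE_ORDER = {
--     "newly constructed" : 0,
--     # 0–1 year bucket
--     "0-1 year"          : 1,
--     "0-1 years"         : 1,
--     "< 1 year"          : 1,
--     "<1 year"           : 1,
--     "< 1 years"         : 1,
--     # 1–2 year bucket
--     "1-2 year"          : 2,
--     "1-2 years"         : 2,
--     "< 2 year"          : 2,
--     "< 2 years"         : 2,
--     "<2 years"          : 2,
--     # 1–3 year bucket (maps between 1-2 and 2-5)
--     "1-3 year"          : 3,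
--     "1-3 years"         : 3,
--     "< 3 year"          : 3,
--     "< 3 years"         : 3,
--     "<3 years"          : 3,
--     "2-3 year"          : 3,
--     "2-3 years"         : 3,
--     # 3–5 year bucket
--     "3-5 year"          : 4,
--     "3-5 years"         : 4,
--     "2-5 year"          : 4,
--     "2-5 years"         : 4,
--     "< 4 year"          : 4,
--     "< 4 years"         : 4,
--     "<4 years"          : 4,
--     "3-4 year"          : 4,
--     "3-4 years"         : 4,
--     "< 5 year"          : 4,
--     "< 5 years"         : 4,
--     "<5 years"          : 4,
--     "4-5 year"          : 4,
--     "4-5 years"         : 4,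
--     # 5–10 year bucket
--     "5-10 year"         : 5,
--     "5-10 years"        : 5,
--     # > 10 year bucket
--     "> 10 year"         : 6,
--     "> 10 years"        : 6,
--     ">10 years"         : 6,
--     "10+ years"         : 6,
--     "10+ year"          : 6,
-- }
--
-- def building_age_sort_key(raw_age):
--     """Return numeric sort key for building age string.
--     Tries exact match first, then substring (longest pattern first)."""
--     if not raw_age or str(raw_age).strip() in ("", "NA", "nan", "None"):
--         return 99
--     normalized = str(raw_age).strip().lower()
--     # Exact match first
--     if normalized in BUILDING_AGE_ORDER:
--         return BUILDING_AGE_ORDER[normalized]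
--     # Substring match — longest pattern first to avoid short patterns shadowing long ones
--     for pattern in sorted(BUILDING_AGE_ORDER.keys(), key=len, reverse=True):
--         if pattern.lower() in normalized:
--             return BUILDING_AGE_ORDER[pattern]
--     return 99
-- ===== SOURCE B (Python) =====
-- BUILDING_AGE_ORDER = {
--     "newly constructed" : 0,
--     "0-1 year"          : 1,
--     "0-1 years"         : 1,
--     "< 1 year"          : 1,
--     "<1 year"           : 1,
--     "< 1 years"         : 1,
--     "1-2 year"          : 2,
--     "1-2 years"         : 2,
--     "< 2 year"          : 2,
--     "< 2 years"         : 2,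
--     "<2 years"          : 2,
--     "1-3 year"          : 3,
--     "1-3 years"         : 3,
--     "< 3 year"          : 3,
--     "< 3 years"         : 3,
--     "<3 years"          : 3,
--     "2-3 year"          : 3,
--     "2-3 years"         : 3,
--     "3-5 year"          : 4,
--     "3-5 years"         : 4,
--     "2-5 year"          : 4,
--     "2-5 years"         : 4,
--     "< 4 year"          : 4,
--     "< 4 years"         : 4,
--     "<4 years"          : 4,
--     "3-4 year"          : 4,
--     "3-4 years"         : 4,
--     "< 5 year"          : 4,
--     "< 5 years"         : 4,
--     "<5 years"          : 4,
--     "4-5 year"          : 4,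
--     "4-5 years"         : 4,
--     "5-10 year"         : 5,
--     "5-10 years"        : 5,
--     "> 10 year"         : 6,
--     "> 10 years"        : 6,
--     ">10 years"         : 6,
--     "10+ years"         : 6,
--     "10+ year"          : 6,
-- }
--
-- def building_age_sort_key(raw_age):
--     """Return numeric sort key for building age string.
--
--     One unsorted pass over BUILDING_AGE_ORDER.items() keeping the value of the
--     longest pattern contained in the normalized string (strict > keeps the
--     earliest dict-order pattern among equal lengths).  No separate exact-match
--     branch is needed: an exact match is itself the unique longest substring
--     pattern."""
--     if not raw_age or str(raw_age).strip() in ("", "NA", "nan", "None"):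
--         return 99
--     normalized = str(raw_age).strip().lower()
--     best_len, best_val = -1, 99
--     for pattern, val in BUILDING_AGE_ORDER.items():
--         if len(pattern) > best_len and pattern in normalized:
--             best_len, best_val = len(pattern), val
--     return best_val
-- ===== Notes on version B (the rewrite author's own statement) =====
-- stated objective: simpler
-- what changed: Removed both the exact-match dict-lookup branch and the sort of all patterns by length: B is a single unsorted pass over the dict items keeping the value of the longest matching pattern (strict > gives the stable tie-break; an exact match is itself the unique longest substring pattern, so the shortcut branch is redundant).
import Mathlib
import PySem

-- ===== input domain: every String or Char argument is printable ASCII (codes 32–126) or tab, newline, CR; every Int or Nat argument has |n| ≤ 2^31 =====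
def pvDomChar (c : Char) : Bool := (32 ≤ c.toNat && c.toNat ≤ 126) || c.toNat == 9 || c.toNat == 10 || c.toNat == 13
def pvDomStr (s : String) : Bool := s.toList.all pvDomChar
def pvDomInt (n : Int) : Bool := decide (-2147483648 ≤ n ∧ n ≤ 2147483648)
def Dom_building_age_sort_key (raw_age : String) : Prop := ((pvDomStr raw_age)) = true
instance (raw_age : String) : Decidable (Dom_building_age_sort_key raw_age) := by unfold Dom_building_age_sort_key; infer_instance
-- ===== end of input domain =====

-- B drops A's exact-match branch and its sort of the patterns by length: one unsorted
-- pass over the dict items keeps the value of the longest matching pattern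
-- (objective: simpler — no sort, no lookup, a single scan).

def buildingAgeOrder : PySem.Dict String Int := PySem.Dict.ofList [
  ("newly constructed", 0),
  ("0-1 year", 1), ("0-1 years", 1), ("< 1 year", 1), ("<1 year", 1), ("< 1 years", 1),
  ("1-2 year", 2), ("1-2 years", 2), ("< 2 year", 2), ("< 2 years", 2), ("<2 years", 2),
  ("1-3 year", 3), ("1-3 years", 3), ("< 3 year", 3), ("< 3 years", 3), ("<3 years", 3),
  ("2-3 year", 3), ("2-3 years", 3),
  ("3-5 year", 4), ("3-5 years", 4), ("2-5 year", 4), ("2-5 years", 4),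
  ("< 4 year", 4), ("< 4 years", 4), ("<4 years", 4), ("3-4 year", 4), ("3-4 years", 4),
  ("< 5 year", 4), ("< 5 years", 4), ("<5 years", 4), ("4-5 year", 4), ("4-5 years", 4),
  ("5-10 year", 5), ("5-10 years", 5),
  ("> 10 year", 6), ("> 10 years", 6), (">10 years", 6), ("10+ years", 6), ("10+ year", 6)]

-- ===== PORT A =====
-- A's substring loop: first pattern (in length-descending stable order) contained in normalized
def loopA : List String → String → Int
  | [], _ => 99
  | p :: ps, normalized =>
      if PySem.Str.isIn (PySem.Str.lower p) normalized then
        (buildingAgeOrder.get? p).getD 99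
      else loopA ps normalized

def building_age_sort_key (raw_age : String) : Int :=
  if raw_age = "" || (PySem.Str.strip raw_age) ∈ (["", "NA", "nan", "None"] : List String) then 99
  else
    let normalized := PySem.Str.lower (PySem.Str.strip raw_age)
    if buildingAgeOrder.contains normalized then (buildingAgeOrder.get? normalized).getD 99
    else loopA (PySem.List.sorted buildingAgeOrder.keys (fun k => PySem.Str.len k) true) normalized

-- ===== PORT B =====
-- B's single pass over the items, accumulating (best_len, best_val); strict > on length
def loopB : List (String × Int) → Int → Int → String → Int
  | [], _, bestVal, _ => bestVal
  | (p, v) :: rest, bestLen, bestVal, normalized =>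
      if decide (bestLen < PySem.Str.len p) && PySem.Str.isIn p normalized then
        loopB rest (PySem.Str.len p) v normalized
      else
        loopB rest bestLen bestVal normalized

def building_age_sort_key_alt (raw_age : String) : Int :=
  if raw_age = "" || (PySem.Str.strip raw_age) ∈ (["", "NA", "nan", "None"] : List String) then 99
  else loopB buildingAgeOrder.items (-1) 99 (PySem.Str.lower (PySem.Str.strip raw_age))

-- ===== PRECONDITION & SPEC =====
def Spec_building_age_sort_key (raw_age : String) (out : Int) : Prop := out = building_age_sort_key_alt raw_age
instance (raw_age : String) (out : Int) : Decidable (Spec_building_age_sort_key raw_age out) := by unfold Spec_building_age_sort_key; infer_instance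

-- ===== CLAIM =====
def Claim_equal_building_age_sort_key : Prop := ∀ (raw_age : String), Dom_building_age_sort_key raw_age → Spec_building_age_sort_key raw_age (building_age_sort_key raw_age)

-- ===== LEMMAS AND PROOFS =====

-- first matching key of a list
def fmk (pred : String → Bool) : List String → Option String
  | [] => none
  | p :: ps => if pred p then some p else fmk pred ps

-- stable insertion sort by length, descending (reference model of sorted(key=len, reverse=True))
def insDesc (x : String) : List String → List String
  | [] => [x]
  | y :: ys => if String.length x < String.length y then y :: insDesc x ys else x :: y :: ys

def isortDesc : List String → List String
  | [] => []
  | x :: xs => insDesc x (isortDesc xs)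

-- earliest key of maximal length among the matching ones (key list / item list versions)
def bestK (pred : String → Bool) : List String → Option String
  | [] => none
  | k :: ks =>
      let r := bestK pred ks
      if pred k then
        match r with
        | some m => if String.length k < String.length m then some m else some k
        | none => some k
      else r

def bestP (pred : String → Bool) : List (String × Int) → Option (String × Int)
  | [] => none
  | (k, v) :: ks =>
      let r := bestP pred ks
      if pred k then
        match r with
        | some m => if String.length k < String.length m.1 then some m else some (k, v)
        | none => some (k, v)
      else r

def comb : Option (String × Int) → Option (String × Int) → Option (String × Int)
  | b, none => b
  | none, some m => some m
  | some b, some m => if String.length b.1 < String.length m.1 then some m else some b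

def stOf : Option (String × Int) → Int × Int
  | none => (-1, 99)
  | some m => ((String.length m.1 : Int), m.2)

def valOf : Option (String × Int) → Int
  | none => 99
  | some m => m.2

theorem loopA_eq_fmk (l : List String) (n : String) :
    loopA l n = match fmk (fun p => PySem.Str.isIn (PySem.Str.lower p) n) l with
      | some k => (buildingAgeOrder.get? k).getD 99
      | none => 99 := by
  induction l with
  | nil => rfl
  | cons p ps ih =>
      simp only [loopA, fmk]
      split <;> simp [ih]

theorem loopB_eq_comb (l : List (String × Int)) (b : Option (String × Int)) (n : String) :
    loopB l (stOf b).1 (stOf b).2 n = valOf (comb b (bestP (fun p => PySem.Str.isIn p n) l)) := by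
  induction l generalizing b with
  | nil => cases b <;> rfl
  | cons kv ks ih =>
      obtain ⟨k, v⟩ := kv
      have ihkv := ih (some (k, v))
      simp only [stOf] at ihkv
      by_cases hk : PySem.Str.isIn k n
      · have hkC : PySem.Chars.isIn k.toList n.toList = true := by
          simpa [PySem.Str.isIn] using hk
        rcases b with _ | ⟨bk, bv⟩
        · have hlt : ((-1 : Int) < (String.length k : Int)) := by
            have := Int.natCast_nonneg (String.length k); omega
          have hred : loopB ((k, v) :: ks) (stOf none).1 (stOf none).2 n
              = loopB ks (String.length k : Int) v n := by
            simp [loopB, stOf, hkC, PySem.Str.len_eq, String.length_toList, hlt]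
          rw [hred, ihkv]
          simp only [bestP, hk, if_true]
          rcases bestP (fun p => PySem.Str.isIn p n) ks with _ | m
          · simp [comb]
          · by_cases h2 : String.length k < String.length m.1 <;> simp [comb, valOf, h2]
        · by_cases h1 : String.length bk < String.length k
          · have hred : loopB ((k, v) :: ks) (stOf (some (bk, bv))).1 (stOf (some (bk, bv))).2 n
                = loopB ks (String.length k : Int) v n := by
              simp [loopB, stOf, hkC, PySem.Str.len_eq, String.length_toList, h1]
            rw [hred, ihkv]
            simp only [bestP, hk, if_true]
            rcases bestP (fun p => PySem.Str.isIn p n) ks with _ | m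
            · simp [comb, h1]
            · by_cases h2 : String.length k < String.length m.1 <;>
              by_cases h3 : String.length bk < String.length m.1 <;>
                first
                  | (simp [comb, valOf, h1, h2, h3]; done)
                  | (simp [comb, valOf, h2, h3]; omega)
          · have hred : loopB ((k, v) :: ks) (stOf (some (bk, bv))).1 (stOf (some (bk, bv))).2 n
                = loopB ks (String.length bk : Int) bv n := by
              simp [loopB, stOf, PySem.Str.len_eq, String.length_toList, h1]
            have ihb := ih (some (bk, bv))
            simp only [stOf] at ihb
            rw [hred, ihb]
            simp only [bestP, hk, if_true]
            rcases bestP (fun p => PySem.Str.isIn p n) ks with _ | m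
            · simp [comb, valOf, h1]
            · by_cases h2 : String.length k < String.length m.1 <;>
              by_cases h3 : String.length bk < String.length m.1 <;>
                first
                  | (simp [comb, valOf, h1, h2, h3]; done)
                  | (simp [comb, valOf, h2, h3]; omega)
      · have hkC : PySem.Chars.isIn k.toList n.toList = false := by
          simpa [PySem.Str.isIn] using hk
        have hred : loopB ((k, v) :: ks) (stOf b).1 (stOf b).2 n
            = loopB ks (stOf b).1 (stOf b).2 n := by
          simp [loopB, hkC]
        rw [hred, ih b]
        simp [bestP, hkC]

theorem mem_insDesc (x z : String) (ys : List String) (hz : z ∈ insDesc x ys) :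
    z = x ∨ z ∈ ys := by
  induction ys with
  | nil => simp [insDesc] at hz; simp [hz]
  | cons y ys ih =>
      simp only [insDesc] at hz
      split at hz
      · rcases List.mem_cons.mp hz with h1 | h1
        · right; simp [h1]
        · rcases ih h1 with h2 | h2
          · left; exact h2
          · right; simp [h2]
      · rcases List.mem_cons.mp hz with h1 | h1
        · left; exact h1
        · right; exact h1

theorem fmk_mem (pred : String → Bool) (l : List String) (m : String)
    (h : fmk pred l = some m) : m ∈ l := by
  induction l with
  | nil => simp [fmk] at h
  | cons w ws ih =>
      simp only [fmk] at h
      split at h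
      · simp at h; simp [h]
      · simp [ih h]

theorem pairwise_insDesc (x : String) (ys : List String)
    (h : ys.Pairwise (fun a b => String.length b ≤ String.length a)) :
    (insDesc x ys).Pairwise (fun a b => String.length b ≤ String.length a) := by
  induction ys with
  | nil => simp [insDesc]
  | cons y ys ih =>
      rcases List.pairwise_cons.mp h with ⟨hy, hys⟩
      simp only [insDesc]
      split
      · rename_i hlt
        refine List.pairwise_cons.mpr ⟨?_, ih hys⟩
        intro z hz
        rcases mem_insDesc x z ys hz with rfl | hz'
        · omega
        · exact hy z hz'
      · rename_i hge
        refine List.pairwise_cons.mpr ⟨?_, h⟩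
        intro z hz
        rcases List.mem_cons.mp hz with rfl | hz'
        · omega
        · have := hy z hz'; omega

theorem pairwise_isortDesc (l : List String) :
    (isortDesc l).Pairwise (fun a b => String.length b ≤ String.length a) := by
  induction l with
  | nil => simp [isortDesc]
  | cons x xs ih => exact pairwise_insDesc x (isortDesc xs) ih

theorem fmk_insDesc (pred : String → Bool) (x : String) (ys : List String)
    (h : ys.Pairwise (fun a b => String.length b ≤ String.length a)) :
    fmk pred (insDesc x ys) =
      if pred x then
        match fmk pred ys with
        | some m => if String.length x < String.length m then some m else some x
        | none => some x
      else fmk pred ys := by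
  induction ys with
  | nil => simp [insDesc, fmk]
  | cons y ys ih =>
      rcases List.pairwise_cons.mp h with ⟨hy, hys⟩
      simp only [insDesc]
      split
      · rename_i hlt
        by_cases hpy : pred y
        · by_cases hpx : pred x <;> simp [fmk, hpy, hpx, hlt]
        · simp [fmk, hpy, ih hys]
      · rename_i hge
        by_cases hpx : pred x
        · by_cases hpy : pred y
          · have hnlt : ¬ String.length x < String.length y := hge
            simp [fmk, hpy, hpx, hnlt]
          · cases hr : fmk pred ys with
            | none => simp [fmk, hpy, hpx, hr]
            | some m =>
                have hlen : String.length m ≤ String.length y := hy m (fmk_mem pred ys m hr)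
                have hnlt : ¬ String.length x < String.length m := by omega
                simp [fmk, hpy, hpx, hr, hnlt]
        · simp [fmk, hpx]

theorem fmk_isortDesc (pred : String → Bool) (l : List String) :
    fmk pred (isortDesc l) = bestK pred l := by
  induction l with
  | nil => rfl
  | cons x xs ih =>
      simp only [isortDesc, bestK]
      rw [fmk_insDesc pred x (isortDesc xs) (pairwise_isortDesc xs), ih]

theorem bestK_map_fst (pred : String → Bool) (l : List (String × Int)) :
    bestK pred (l.map Prod.fst) = (bestP pred l).map Prod.fst := by
  induction l with
  | nil => rfl
  | cons kv ks ih =>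
      obtain ⟨k, v⟩ := kv
      simp only [List.map_cons, bestK, bestP, ih]
      by_cases hk : pred k
      · simp only [hk, if_true]
        rcases bestP pred ks with _ | m
        · rfl
        · by_cases h2 : String.length k < String.length m.1 <;> simp [h2]
      · simp [hk]

theorem bestP_mem (pred : String → Bool) (l : List (String × Int)) (m : String × Int)
    (h : bestP pred l = some m) : m ∈ l := by
  induction l with
  | nil => simp [bestP] at h
  | cons kv ks ih =>
      obtain ⟨k, v⟩ := kv
      by_cases hk : pred k
      · rcases hr : bestP pred ks with _ | mm
        · simp only [bestP, hr, hk, if_true] at h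
          simp at h; simp [h]
        · simp only [bestP, hr, hk, if_true] at h
          by_cases h2 : String.length k < String.length mm.1
          · rw [if_pos h2] at h
            simp at h
            exact List.mem_cons_of_mem _ (ih (h ▸ hr))
          · rw [if_neg h2] at h
            simp at h; simp [h]
      · simp only [bestP, hk, Bool.false_eq_true, if_false] at h
        exact List.mem_cons_of_mem _ (ih h)

theorem bestK_mem (pred : String → Bool) (l : List String) (m : String)
    (h : bestK pred l = some m) : m ∈ l ∧ pred m = true := by
  induction l with
  | nil => simp [bestK] at h
  | cons k ks ih =>
      by_cases hk : pred k
      · rcases hr : bestK pred ks with _ | mm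
        · simp only [bestK, hr, hk, if_true] at h
          simp at h; subst h; exact ⟨List.mem_cons_self, hk⟩
        · simp only [bestK, hr, hk, if_true] at h
          by_cases h2 : String.length k < String.length mm
          · rw [if_pos h2] at h
            simp at h; subst h
            rcases ih hr with ⟨h1, h2⟩
            exact ⟨List.mem_cons_of_mem _ h1, h2⟩
          · rw [if_neg h2] at h
            simp at h; subst h; exact ⟨List.mem_cons_self, hk⟩
      · simp only [bestK, hk, Bool.false_eq_true, if_false] at h
        rcases ih h with ⟨h1, h2⟩
        exact ⟨List.mem_cons_of_mem _ h1, h2⟩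

-- if n itself matches and every other match is strictly shorter, the best is n
theorem bestK_eq_of_max (pred : String → Bool) (l : List String) (n : String)
    (hn : pred n = true) (hmem : n ∈ l)
    (hmax : ∀ p ∈ l, pred p = true → String.length p < String.length n ∨ p = n) :
    bestK pred l = some n := by
  induction l with
  | nil => simp at hmem
  | cons k ks ih =>
      simp only [bestK]
      by_cases hkn : k = n
      · subst hkn
        simp only [hn, if_true]
        rcases hr : bestK pred ks with _ | m
        · rfl
        · rcases bestK_mem pred ks m hr with ⟨hm1, hm2⟩
          rcases hmax m (List.mem_cons_of_mem _ hm1) hm2 with hlt | hmn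
          · have hx : ¬ String.length k < String.length m := by omega
            simp [hx]
          · subst hmn; simp
      · have hmem' : n ∈ ks := by
          rcases List.mem_cons.mp hmem with h | h
          · exact absurd h.symm hkn
          · exact h
        have hrec := ih hmem' (fun p hp => hmax p (List.mem_cons_of_mem _ hp))
        by_cases hk : pred k
        · rcases hmax k List.mem_cons_self hk with hlt | rfl
          · simp [hk, hrec, hlt]
          · exact absurd rfl hkn
        · simp [hk, hrec]

set_option maxRecDepth 8000 in
theorem sorted_keys_eq : PySem.List.sorted buildingAgeOrder.keys (fun k => PySem.Str.len k) true
    = isortDesc buildingAgeOrder.keys := by decide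

set_option maxRecDepth 8000 in
theorem lower_keys_all : buildingAgeOrder.keys.all (fun x => PySem.Str.lower x == x) = true := by decide

theorem lower_keys (x : String) (hx : x ∈ buildingAgeOrder.keys) : PySem.Str.lower x = x := by
  have := List.all_eq_true.mp lower_keys_all x hx
  simpa using this

set_option maxRecDepth 8000 in
theorem getD_items_all :
    buildingAgeOrder.items.all (fun kv => buildingAgeOrder.getD kv.1 99 == kv.2) = true := by decide

theorem getD_items (kv : String × Int) (h : kv ∈ buildingAgeOrder.items) :
    buildingAgeOrder.getD kv.1 99 = kv.2 := by
  have := List.all_eq_true.mp getD_items_all kv h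
  simpa using this

theorem fmk_congr (pred pred' : String → Bool) (l : List String)
    (h : ∀ x ∈ l, pred x = pred' x) : fmk pred l = fmk pred' l := by
  induction l with
  | nil => rfl
  | cons x xs ih =>
      simp only [fmk, h x (List.mem_cons_self)]
      split <;> [rfl; exact ih fun y hy => h y (List.mem_cons_of_mem _ hy)]

theorem mem_isortDesc (z : String) (l : List String) (hz : z ∈ isortDesc l) : z ∈ l := by
  induction l with
  | nil => simp [isortDesc] at hz
  | cons x xs ih =>
      rcases mem_insDesc x z (isortDesc xs) hz with rfl | h
      · exact List.mem_cons_self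
      · exact List.mem_cons_of_mem _ (ih h)

-- a matching pattern is at most as long as the string; at equal length it IS the string
theorem isIn_len_lt_or_eq (p n : String) (h : PySem.Str.isIn p n = true) :
    String.length p < String.length n ∨ p = n := by
  have hinf : p.toList <:+: n.toList := (PySem.Str.isIn_iff_infix p n).mp h
  have hle : p.toList.length ≤ n.toList.length := hinf.length_le
  by_cases heq : p.toList.length = n.toList.length
  · right
    exact String.toList_inj.mp (hinf.eq_of_length heq)
  · left
    have h1 : p.toList.length = String.length p := String.length_toList
    have h2 : n.toList.length = String.length n := String.length_toList
    omega

theorem isIn_self (n : String) : PySem.Str.isIn n n = true :=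
  (PySem.Str.isIn_iff_infix n n).mpr (List.infix_refl _)

-- the common second half: both results equal the value of the best matching item
theorem A_loop_eq_bestK (n : String) :
    loopA (PySem.List.sorted buildingAgeOrder.keys (fun k => PySem.Str.len k) true) n =
      match bestK (fun p => PySem.Str.isIn p n) buildingAgeOrder.keys with
      | some k => (buildingAgeOrder.get? k).getD 99
      | none => 99 := by
  rw [loopA_eq_fmk, sorted_keys_eq,
    fmk_congr (fun p => PySem.Str.isIn (PySem.Str.lower p) n) (fun p => PySem.Str.isIn p n)
      (isortDesc buildingAgeOrder.keys)
      (fun x hx => by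
        show PySem.Str.isIn (PySem.Str.lower x) n = PySem.Str.isIn x n
        rw [lower_keys x (mem_isortDesc x _ hx)]),
    fmk_isortDesc]

theorem B_loop_eq_bestP (n : String) :
    loopB buildingAgeOrder.items (-1) 99 n =
      valOf (bestP (fun p => PySem.Str.isIn p n) buildingAgeOrder.items) := by
  have hcomb : ∀ r : Option (String × Int), comb none r = r := by rintro (_ | m) <;> rfl
  have h := loopB_eq_comb buildingAgeOrder.items none n
  rw [hcomb] at h
  exact h

theorem keys_eq_map_fst : buildingAgeOrder.keys = buildingAgeOrder.items.map Prod.fst := rfl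

-- ===== VERDICT (by name: the statement is the Claim_ definition above) =====
set_option maxRecDepth 8000 in
theorem building_age_sort_key_spec : Claim_equal_building_age_sort_key := by
  intro raw_age _
  unfold Spec_building_age_sort_key building_age_sort_key building_age_sort_key_alt
  split
  · rfl
  · simp only []
    set n := PySem.Str.lower (PySem.Str.strip raw_age) with hn
    rw [B_loop_eq_bestP]
    split
    · -- exact-match branch of A
      rename_i hcont
      have hmem : n ∈ buildingAgeOrder.keys :=
        (PySem.Dict.contains_iff_mem_keys buildingAgeOrder n).mp hcont
      have hbestK : bestK (fun p => PySem.Str.isIn p n) buildingAgeOrder.keys = some n :=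
        bestK_eq_of_max _ _ n (isIn_self n) hmem
          (fun p _ hp => isIn_len_lt_or_eq p n hp)
      rw [keys_eq_map_fst, bestK_map_fst] at hbestK
      rcases hbp : bestP (fun p => PySem.Str.isIn p n) buildingAgeOrder.items with _ | kv
      · rw [hbp] at hbestK; simp at hbestK
      · rw [hbp] at hbestK
        simp only [Option.map_some] at hbestK
        have hk1 : kv.1 = n := by injection hbestK
        have hval := getD_items kv (bestP_mem _ _ kv hbp)
        rw [hk1] at hval
        rw [PySem.Dict.getD_eq_get?_getD] at hval
        simp [valOf, hval]
    · -- substring branch of A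
      rw [A_loop_eq_bestK]
      have hmap := bestK_map_fst (fun p => PySem.Str.isIn p n) buildingAgeOrder.items
      rw [← keys_eq_map_fst] at hmap
      rcases hbp : bestP (fun p => PySem.Str.isIn p n) buildingAgeOrder.items with _ | kv <;>
        rw [hbp] at hmap
      · simp only [Option.map_none] at hmap
        rw [hmap]; rfl
      · simp only [Option.map_some] at hmap
        rw [hmap]
        have hval := getD_items kv (bestP_mem _ _ kv hbp)
        rw [PySem.Dict.getD_eq_get?_getD] at hval
        simp [valOf, hval]
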